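-- pv_equiv track=rewrite | github.com/semacammetu/Hypothesis-driven-experiment-design-with-SEDML-extension | stl_fs_sm-master/stl_fs_sm-master/cause_mining_algo/helper_funs.py | concat_with_or_infix
-- ===== SOURCE A (Python) =====
-- def concat_with_or_infix(formula_list):
--     """
--     Probably is buggy
--     Written as a helper function for search_all_search_space function.
--     Args:
--         formula_list: list of infix formulas to be concatenated with or. For example, for
--         formula_list=['( A 0 pA ( x6 = p6 ) ) & ( ( x0 > p0 ) | ( x2 > p2 ) )','( A 0 pA ( x6 = p6 ) ) & ( x0 > p0 )'],
--         result is '( ( A 0 pA ( x6 = p6 ) ) & ( ( x0 > p0 ) | ( x2 > p2 ) ) | ( A 0 pA ( x6 = p6 ) ) & ( x0 > p0 ) )'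
--     Returns: result (infix formula) type: String
--
--     Note: as a side effect, it turns the input list formula_list into a list with one element, which is the result
--
--     """
--     length = len(formula_list)
--     if length == 1:
--         return formula_list[0]
--     else:
--         formula1 = formula_list[0]
--         formula2 = formula_list[1]
--         concat_formula = '( ( ' + formula1 + ' ) | ( ' + formula2 + ' ) )'
--         formula_list.pop(0)
--         formula_list.pop(0)
--         formula_list.append(concat_formula)
--         return concat_with_or_infix(formula_list)
-- ===== SOURCE B (Python) =====
-- def concat_with_or_infix(formula_list):
--     # One-pass queue: read with an index pointer instead of pop(0)-shifting,
--     # iterative instead of recursive; does not mutate the caller's list.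
--     items = list(formula_list)
--     i = 0
--     while len(items) - i > 1:
--         items.append('( ( ' + items[i] + ' ) | ( ' + items[i + 1] + ' ) )')
--         i += 2
--     return items[i]
-- ===== Notes on version B (the rewrite author's own statement) =====
-- stated objective: faster
-- what changed: Replaces A's recursive pop(0)/pop(0)/append queue rewriting with a single iterative pass that reads the growing work list through an index pointer, building the identical nested string without mutating the caller's list (return value equivalence; A additionally empties and refills its argument).
import Mathlib
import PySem

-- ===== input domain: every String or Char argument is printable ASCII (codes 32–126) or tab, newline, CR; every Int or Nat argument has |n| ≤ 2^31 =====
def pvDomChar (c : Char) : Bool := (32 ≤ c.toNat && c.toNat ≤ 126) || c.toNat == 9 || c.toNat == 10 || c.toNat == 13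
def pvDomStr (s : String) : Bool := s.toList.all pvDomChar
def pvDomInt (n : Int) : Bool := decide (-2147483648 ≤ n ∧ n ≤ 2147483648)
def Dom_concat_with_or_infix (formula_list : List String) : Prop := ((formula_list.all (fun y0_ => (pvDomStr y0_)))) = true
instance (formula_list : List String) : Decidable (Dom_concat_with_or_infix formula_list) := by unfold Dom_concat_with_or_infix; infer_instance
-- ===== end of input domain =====

-- ===== PORT A =====
-- Literal port of A: recursion takes the first two formulas, pops them and appends
-- their OR-combination, then recurses. Return-value equivalence only: Python A also
-- mutates its argument list in place; B does not.
def concat_with_or_infix (formula_list : List String) : String :=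
  match formula_list with
  | [f] => f                                    -- length == 1: return formula_list[0]
  | f1 :: f2 :: rest =>
      -- pop(0); pop(0); append(concat_formula); recurse
      concat_with_or_infix (rest ++ ["( ( " ++ f1 ++ " ) | ( " ++ f2 ++ " ) )"])
  | [] => ""                                    -- Python raises IndexError here; excluded by Pre_
termination_by formula_list.length
decreasing_by simp

-- ===== PORT B =====
-- Iterative queue with an index pointer into the growing work list (Source B's loop).
def concatAltLoop (items : List String) (i : Nat) : String :=
  if h : items.length - i > 1 then
    concatAltLoop
      (items ++ ["( ( " ++ items.getD i "" ++ " ) | ( " ++ items.getD (i + 1) "" ++ " ) )"])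
      (i + 2)
  else
    items.getD i ""                             -- items[i]; IndexError for [] excluded by Pre_
termination_by items.length - i
decreasing_by simp; omega

def concat_with_or_infix_alt (formula_list : List String) : String :=
  concatAltLoop formula_list 0

-- ===== PRECONDITION & SPEC =====
-- Python A (and B) raise IndexError on the empty list; nothing else is excluded.
def Pre_concat_with_or_infix (formula_list : List String) : Prop := formula_list ≠ []
instance (formula_list : List String) : Decidable (Pre_concat_with_or_infix formula_list) := by
  unfold Pre_concat_with_or_infix; infer_instance
def pvWitness_concat_with_or_infix : List String := ["( x0 > p0 )", "( x1 = p1 )"]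
def Spec_concat_with_or_infix (formula_list : List String) (out : String) : Prop := out = concat_with_or_infix_alt formula_list
instance (formula_list : List String) (out : String) : Decidable (Spec_concat_with_or_infix formula_list out) := by unfold Spec_concat_with_or_infix; infer_instance

-- ===== CLAIM (what is proved, stated in full; the proofs are below) =====
def Claim_equal_concat_with_or_infix : Prop := ∀ (formula_list : List String), Dom_concat_with_or_infix formula_list → Pre_concat_with_or_infix formula_list → Spec_concat_with_or_infix formula_list (concat_with_or_infix formula_list)

-- ===== LEMMAS AND PROOFS =====

-- Loop invariant: the index-pointer loop over `items` from position `i` computes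
-- exactly A's queue recursion applied to the remaining suffix `items.drop i`.
theorem concatAltLoop_eq (items : List String) (i : Nat) :
    concatAltLoop items i = concat_with_or_infix (items.drop i) := by
  rw [concatAltLoop]
  split
  · rename_i h
    have hi : i < items.length := by omega
    have hi1 : i + 1 < items.length := by omega
    have hdrop : items.drop i = items[i] :: items[i+1] :: items.drop (i+2) := by
      rw [List.drop_eq_getElem_cons hi, List.drop_eq_getElem_cons hi1]
    rw [concatAltLoop_eq _ (i + 2)]
    rw [List.drop_append_of_le_length (by omega)]
    rw [hdrop]; simp only [concat_with_or_infix]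
    simp [List.getD, hi, hi1]
  · rename_i h
    by_cases hi : i < items.length
    · have hlen : (items.drop i).length = 1 := by simp; omega
      have hdrop : items.drop i = [items[i]] := by
        rw [List.drop_eq_getElem_cons hi]
        have : items.drop (i+1) = [] := by
          apply List.eq_nil_of_length_eq_zero; simp; omega
        rw [this]
      rw [hdrop]; simp only [concat_with_or_infix]
      simp [List.getD, hi]
    · have : items.drop i = [] := by
        apply List.eq_nil_of_length_eq_zero; simp; omega
      rw [this]; simp only [concat_with_or_infix]
      simp [List.getD, hi]
termination_by items.length - i
decreasing_by simp; omega

-- ===== VERDICT (by name: the statement is the Claim_ definition above) =====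
theorem concat_with_or_infix_spec : Claim_equal_concat_with_or_infix := by
  intro l _ _
  unfold Spec_concat_with_or_infix concat_with_or_infix_alt
  rw [concatAltLoop_eq]
  simp
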